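-- pv_equiv track=rewrite | github.com/KaartGroup/GEM | Py/GEM3.py | get_index_parsed_users
-- ===== SOURCE A (Python) =====
-- def get_index_parsed_users(parsed_users: dict, user_key: str) -> str:
--     """
--     Parse a user dict to find the index key. It assumes that the user_key
--     is unique in the dict. The primary purpose is if someone used different
--     methods for determining the `set .class` in the mapcss file.
--     """
--     if user_key in parsed_users:
--         return user_key
--     for user in parsed_users:
--         for key in parsed_users[user]:
--             if parsed_users[user][key] == user_key:
--                 return user
--     return None
-- ===== SOURCE B (Python) =====
-- def get_index_parsed_users(parsed_users: dict, user_key: str) -> str: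
--     """Reverse-index version: one pass builds value -> owning user (first
--     occurrence wins via setdefault), then a single lookup replaces the
--     nested comparison scan."""
--     if user_key in parsed_users:
--         return user_key
--     reverse = {}
--     for user, inner in parsed_users.items():
--         for value in inner.values():
--             reverse.setdefault(value, user)
--     return reverse.get(user_key)
-- ===== Notes on version B (the rewrite author's own statement) =====
-- stated objective: idiomatic
-- what changed: Replaces the nested comparison scan with a reverse index dict (inner value -> first owning user, built with setdefault) so the answer is a single dict lookup with the same None default.
import Mathlib
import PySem

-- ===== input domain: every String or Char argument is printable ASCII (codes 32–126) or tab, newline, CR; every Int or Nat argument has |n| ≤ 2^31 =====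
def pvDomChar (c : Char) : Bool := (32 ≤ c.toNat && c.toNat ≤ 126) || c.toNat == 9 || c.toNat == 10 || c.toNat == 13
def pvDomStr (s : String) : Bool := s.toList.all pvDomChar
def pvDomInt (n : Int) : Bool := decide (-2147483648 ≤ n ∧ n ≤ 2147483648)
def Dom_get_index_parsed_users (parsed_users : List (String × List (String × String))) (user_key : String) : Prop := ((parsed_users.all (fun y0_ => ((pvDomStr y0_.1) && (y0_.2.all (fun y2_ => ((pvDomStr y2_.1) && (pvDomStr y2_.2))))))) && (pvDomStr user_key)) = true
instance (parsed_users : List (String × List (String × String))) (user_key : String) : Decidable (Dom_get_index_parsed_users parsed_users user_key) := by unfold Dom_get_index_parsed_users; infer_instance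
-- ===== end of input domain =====

-- B replaces A's nested comparison scan by a reverse index (inner value -> first owning
-- user, kept first-occurrence via setdefault) queried once; same result, more idiomatic.

-- ===== PORT A =====
-- inner loop: for key in parsed_users[user]: if parsed_users[user][key] == user_key: return user
def pvScanInner (user : String) (inner : List (String × String)) (user_key : String) : Option String :=
  match inner with
  | [] => none
  | kv :: rest => if kv.2 == user_key then some user else pvScanInner user rest user_key

-- outer loop: for user in parsed_users: … ; return None
def pvScanA (parsed_users : List (String × List (String × String))) (user_key : String) : Option String :=
  match parsed_users with
  | [] => none
  | p :: rest =>
    match pvScanInner p.1 p.2 user_key with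
    | some u => some u
    | none => pvScanA rest user_key

def get_index_parsed_users (parsed_users : List (String × List (String × String))) (user_key : String) : Option String :=
  if parsed_users.any (fun p => p.1 == user_key) then some user_key
  else pvScanA parsed_users user_key

-- ===== PORT B =====
-- reverse = {}; for user, inner in items: for value in inner.values(): reverse.setdefault(value, user)
def pvReverse (parsed_users : List (String × List (String × String))) : PySem.Dict String String :=
  parsed_users.foldl
    (fun d p => p.2.foldl (fun d kv => d.setdefault kv.2 p.1) d)
    PySem.Dict.empty

def get_index_parsed_users_alt (parsed_users : List (String × List (String × String))) (user_key : String) : Option String :=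
  if parsed_users.any (fun p => p.1 == user_key) then some user_key
  else (pvReverse parsed_users).get? user_key

-- ===== PRECONDITION & SPEC =====
def Spec_get_index_parsed_users (parsed_users : List (String × List (String × String))) (user_key : String) (out : Option String) : Prop := out = get_index_parsed_users_alt parsed_users user_key
instance (parsed_users : List (String × List (String × String))) (user_key : String) (out : Option String) : Decidable (Spec_get_index_parsed_users parsed_users user_key out) := by unfold Spec_get_index_parsed_users; infer_instance

-- ===== CLAIM (what is proved, stated in full; the proofs are below) =====
def Claim_equal_get_index_parsed_users : Prop := ∀ (parsed_users : List (String × List (String × String))) (user_key : String), Dom_get_index_parsed_users parsed_users user_key → Spec_get_index_parsed_users parsed_users user_key (get_index_parsed_users parsed_users user_key)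

-- ===== LEMMAS AND PROOFS =====

-- one inner fold of setdefaults: an existing binding is kept, otherwise the first match wins
theorem pv_inner_fold (user user_key : String) (inner : List (String × String))
    (d : PySem.Dict String String) :
    (inner.foldl (fun d kv => d.setdefault kv.2 user) d).get? user_key =
      match d.get? user_key with
      | some v => some v
      | none => pvScanInner user inner user_key := by
  induction inner generalizing d with
  | nil => simp [pvScanInner]; cases d.get? user_key <;> rfl
  | cons kv rest ih =>
    simp only [List.foldl_cons, ih, pvScanInner]
    by_cases hc : d.contains kv.2
    · rw [PySem.Dict.setdefault_of_contains _ _ hc]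
      rcases h : d.get? user_key with _ | v
      · have : ¬ (kv.2 == user_key) = true := by
          intro hb
          rw [eq_of_beq hb] at hc
          rw [PySem.Dict.contains_eq_isSome_get?, h] at hc
          simp at hc
        simp [this]
      · rfl
    · rw [PySem.Dict.setdefault_of_not_contains _ _ (by simpa using hc)]
      rw [PySem.Dict.get?_insert]
      by_cases he : user_key = kv.2
      · have hd : d.get? kv.2 = none := by
          rw [PySem.Dict.get?_eq_none_iff_contains]; simpa using hc
        simp [he, hd]
      · have hne : ¬ (kv.2 == user_key) = true := by
          intro hb; exact he (eq_of_beq hb).symm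
        simp [he, hne]

-- the whole reverse-index fold looks up exactly what A's nested scan returns
theorem pv_outer_fold (user_key : String)
    (parsed_users : List (String × List (String × String)))
    (d : PySem.Dict String String) :
    (parsed_users.foldl (fun d p => p.2.foldl (fun d kv => d.setdefault kv.2 p.1) d) d).get? user_key =
      match d.get? user_key with
      | some v => some v
      | none => pvScanA parsed_users user_key := by
  induction parsed_users generalizing d with
  | nil => simp [pvScanA]; cases d.get? user_key <;> rfl
  | cons p rest ih =>
    simp only [List.foldl_cons, ih, pvScanA, pv_inner_fold]
    rcases d.get? user_key with _ | v
    · rcases pvScanInner p.1 p.2 user_key with _ | u <;> rfl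
    · rfl

theorem pv_reverse_get (parsed_users : List (String × List (String × String))) (user_key : String) :
    (pvReverse parsed_users).get? user_key = pvScanA parsed_users user_key := by
  unfold pvReverse
  rw [pv_outer_fold]
  simp [PySem.Dict.get?_empty]

-- ===== VERDICT (by name: the statement is the Claim_ definition above) =====
theorem get_index_parsed_users_spec : Claim_equal_get_index_parsed_users := by
  intro parsed_users user_key _
  unfold Spec_get_index_parsed_users get_index_parsed_users get_index_parsed_users_alt
  rw [pv_reverse_get]
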